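-- pv_equiv track=rewrite | github.com/nanayuri/gakki_python | 球票.py | calc_queue
-- ===== SOURCE A (Python) =====
-- def calc_queue(m, n):
--     if n == 0:
--         queue = 1
--     elif n > m:
--         queue = 0
--     else:
--         queue = calc_queue(m, n-1) + calc_queue(m-1, n)
--     return queue
-- ===== SOURCE B (Python) =====
-- def calc_queue(m, n):
--     if n == 0:
--         return 1
--     if n > m:
--         return 0
--     def comb(a, b):
--         r = 1
--         for i in range(b):
--             r = r * (a - i) // (i + 1)
--         return r
--     return comb(m + n, n) - comb(m + n, n - 1)
-- ===== Notes on version B (the rewrite author's own statement) =====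
-- stated objective: alternative
-- what changed: Replaced the two-way recursion by the closed-form ballot-number formula C(m+n,n) - C(m+n,n-1) computed with a single multiplicative binomial loop.
import Mathlib
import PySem

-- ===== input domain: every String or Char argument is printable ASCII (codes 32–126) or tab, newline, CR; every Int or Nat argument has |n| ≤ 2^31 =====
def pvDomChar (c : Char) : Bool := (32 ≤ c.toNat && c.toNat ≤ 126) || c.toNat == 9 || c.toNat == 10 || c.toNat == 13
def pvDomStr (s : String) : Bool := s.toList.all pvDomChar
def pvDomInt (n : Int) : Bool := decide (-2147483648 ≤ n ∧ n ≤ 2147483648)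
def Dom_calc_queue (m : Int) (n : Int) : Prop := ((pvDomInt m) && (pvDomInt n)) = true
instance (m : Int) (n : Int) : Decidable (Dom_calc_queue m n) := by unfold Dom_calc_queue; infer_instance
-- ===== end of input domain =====

-- B replaces A's two-way recursion by the closed-form ballot number
-- C(m+n,n) - C(m+n,n-1) computed with a single multiplicative binomial loop (objective: alternative).

-- ===== PORT A =====
-- A is a recursion on (m, n) with no structural measure Lean accepts; the fuel
-- ((m+n).toNat + 1) is a pure totality guard: it is sufficient on every input where the
-- Python recursion terminates (proved in the lemmas below), and the computation is A's own.
def calcQueueFuel : Nat → Int → Int → Int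
  | 0, _, _ => 0
  | fuel+1, m, n =>
    if n = 0 then 1
    else if n > m then 0
    else calcQueueFuel fuel m (n-1) + calcQueueFuel fuel (m-1) n

def calc_queue (m : Int) (n : Int) : Int := calcQueueFuel ((m + n).toNat + 1) m n

-- ===== PORT B =====
-- Source B's helper comb(a, b): r = 1; for i in range(b): r = r * (a - i) // (i + 1)
def combB (a : Int) (b : Int) : Int :=
  (PySem.List.pyRange 0 b 1).foldl (fun r i => PySem.Int.floordiv (r * (a - i)) (i + 1)) 1

def calc_queue_alt (m : Int) (n : Int) : Int :=
  if n = 0 then 1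
  else if n > m then 0
  else combB (m + n) n - combB (m + n) (n - 1)

-- ===== PRECONDITION & SPEC =====
-- Pre_ excludes exactly the inputs (n < 0 and n ≤ m) on which the Python A recurses
-- forever (RecursionError); A returns normally on every other input.
def Pre_calc_queue (m : Int) (n : Int) : Prop := 0 ≤ n ∨ m < n
instance (m : Int) (n : Int) : Decidable (Pre_calc_queue m n) := by unfold Pre_calc_queue; infer_instance
def pvWitness_calc_queue : Int × Int := (5, 3)

def Spec_calc_queue (m : Int) (n : Int) (out : Int) : Prop := out = calc_queue_alt m n
instance (m : Int) (n : Int) (out : Int) : Decidable (Spec_calc_queue m n out) := by unfold Spec_calc_queue; infer_instance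

-- ===== CLAIM (what is proved, stated in full; the proofs are below) =====
def Claim_equal_calc_queue : Prop := ∀ (m : Int) (n : Int), Dom_calc_queue m n → Pre_calc_queue m n → Spec_calc_queue m n (calc_queue m n)

-- ===== LEMMAS AND PROOFS =====

-- Mathematical reference function: A's recurrence on naturals.
def Fnat : Nat → Nat → Int
  | _, 0 => 1
  | m, n+1 =>
    if m < n+1 then 0
    else Fnat m n + Fnat (m-1) (n+1)
termination_by m n => m + n
decreasing_by all_goals omega

lemma Fnat_rec (M N : Nat) (h1 : 1 ≤ N) (h2 : N ≤ M) :
    Fnat M N = Fnat M (N - 1) + Fnat (M - 1) N := by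
  obtain ⟨k, rfl⟩ : ∃ k, N = k + 1 := ⟨N - 1, by omega⟩
  rw [Fnat, if_neg (by omega)]
  simp

lemma calcQueueFuel_eq_Fnat (fuel : Nat) (m n : Int) (hn : 0 ≤ n)
    (hf : (m + n).toNat < fuel) :
    calcQueueFuel fuel m n = Fnat m.toNat n.toNat := by
  induction fuel generalizing m n with
  | zero => omega
  | succ f ih =>
    simp only [calcQueueFuel]
    by_cases h0 : n = 0
    · subst h0; simp [Fnat]
    · rw [if_neg h0]
      by_cases h1 : n > m
      · rw [if_pos h1]
        have hN : n.toNat = (n.toNat - 1) + 1 := by omega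
        rw [hN, Fnat, if_pos (by omega)]
      · rw [if_neg h1]
        rw [ih m (n - 1) (by omega) (by omega), ih (m - 1) n (by omega) (by omega)]
        have e1 : (n - 1).toNat = n.toNat - 1 := by omega
        have e2 : (m - 1).toNat = m.toNat - 1 := by omega
        rw [e1, e2, Fnat_rec m.toNat n.toNat (by omega) (by omega)]

-- comb loop = binomial coefficient
lemma combB_eq_choose (a b : Nat) (hba : b ≤ a) :
    combB (a : Int) (b : Int) = (Nat.choose a b : Int) := by
  unfold combB
  induction b with
  | zero => simp [PySem.List.pyRange_one_eq_nil (by omega : (0:Int) ≤ 0)]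
  | succ b ihb =>
    have hcast : ((b + 1 : Nat) : Int) = (b : Int) + 1 := by push_cast; ring
    rw [hcast, PySem.List.pyRange_one_succ_right (by positivity), List.foldl_append,
        ihb (by omega)]
    simp only [List.foldl]
    have hsub : (a : Int) - (b : Int) = ((a - b : Nat) : Int) := by omega
    rw [hsub]
    have key : Nat.choose a b * (a - b) = Nat.choose a (b + 1) * (b + 1) :=
      (Nat.choose_succ_right_eq a b).symm
    have : (Nat.choose a b : Int) * ((a - b : Nat) : Int) = ((Nat.choose a (b+1) * (b+1) : Nat) : Int) := by
      push_cast [← key]; ring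
    rw [this]
    have : ((b : Int) + 1) = ((b + 1 : Nat) : Int) := by push_cast; ring
    rw [this, PySem.Int.floordiv_natCast]
    congr 1
    exact Nat.mul_div_cancel _ (by omega)

-- ballot closed form
lemma Fnat_closed (M N : Nat) (h1 : 1 ≤ N) (h2 : N ≤ M + 1) :
    Fnat M N = (Nat.choose (M + N) N : Int) - (Nat.choose (M + N) (N - 1) : Int) := by
  have main : ∀ (s M N : Nat), M + N ≤ s → 1 ≤ N → N ≤ M + 1 →
      Fnat M N = (Nat.choose (M + N) N : Int) - (Nat.choose (M + N) (N - 1) : Int) := by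
    intro s
    induction s with
    | zero => intro M N h h1 h2; omega
    | succ s ih =>
      intro M N hs h1 h2
      obtain ⟨k, rfl⟩ : ∃ k, N = k + 1 := ⟨N - 1, by omega⟩
      rw [Fnat]
      by_cases hMk : M < k + 1
      · rw [if_pos hMk]
        have hk : k = M := by omega
        subst hk
        have hsymm : Nat.choose (k + (k + 1)) k = Nat.choose (k + (k + 1)) (k + 1) := by
          have h := Nat.choose_symm (n := k + (k + 1)) (k := k + 1) (by omega)
          have e : k + (k + 1) - (k + 1) = k := by omega
          rw [e] at h
          exact h
        simp [hsymm]
      · rw [if_neg hMk]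
        by_cases hk0 : k = 0
        · subst hk0
          have hM1 : 1 ≤ M := by omega
          rw [show Fnat M 0 = 1 by rw [Fnat]]
          rw [ih (M - 1) 1 (by omega) (by omega) (by omega)]
          have e : M - 1 + 1 = M := by omega
          rw [e]
          simp [Nat.choose_one_right, Nat.choose_zero_right]
        · obtain ⟨j, rfl⟩ : ∃ j, k = j + 1 := ⟨k - 1, by omega⟩
          rw [ih M (j + 1) (by omega) (by omega) (by omega),
              ih (M - 1) (j + 1 + 1) (by omega) (by omega) (by omega)]
          have e : M - 1 + (j + 1 + 1) = M + (j + 1) := by omega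
          rw [e]
          have p1 : Nat.choose (M + (j + 1 + 1)) (j + 1 + 1) =
              Nat.choose (M + (j + 1)) (j + 1) + Nat.choose (M + (j + 1)) (j + 1 + 1) := by
            have e2 : M + (j + 1 + 1) = (M + (j + 1)) + 1 := by omega
            rw [e2]; exact Nat.choose_succ_succ _ _
          have p2 : Nat.choose (M + (j + 1 + 1)) (j + 1) =
              Nat.choose (M + (j + 1)) j + Nat.choose (M + (j + 1)) (j + 1) := by
            have e2 : M + (j + 1 + 1) = (M + (j + 1)) + 1 := by omega
            rw [e2]; exact Nat.choose_succ_succ _ _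
          simp only [Nat.add_sub_cancel]
          rw [p1, p2]
          push_cast
          ring
  exact main (M + N) M N le_rfl h1 h2

-- ===== VERDICT (by name: the statement is the Claim_ definition above) =====
theorem calc_queue_spec : Claim_equal_calc_queue := by
  intro m n _ hpre
  unfold Spec_calc_queue calc_queue calc_queue_alt
  by_cases h0 : n = 0
  · subst h0
    simp [calcQueueFuel]
  · rw [if_neg h0]
    by_cases h1 : n > m
    · rw [if_pos h1]
      have : calcQueueFuel ((m + n).toNat + 1) m n = 0 := by
        simp only [calcQueueFuel]
        rw [if_neg h0, if_pos h1]
      rw [this]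
    · rw [if_neg h1]
      have hn : 0 ≤ n := by
        rcases hpre with h | h
        · exact h
        · omega
      have hn1 : 1 ≤ n := by omega
      have hm : n ≤ m := by omega
      rw [calcQueueFuel_eq_Fnat _ m n hn (by omega)]
      have hMN : m + n = ((m.toNat + n.toNat : Nat) : Int) := by omega
      have hNN : n = ((n.toNat : Nat) : Int) := by omega
      have hN1 : n - 1 = ((n.toNat - 1 : Nat) : Int) := by omega
      have hc1 := combB_eq_choose (m.toNat + n.toNat) n.toNat (by omega)
      have hc2 := combB_eq_choose (m.toNat + n.toNat) (n.toNat - 1) (by omega)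
      rw [← hMN, ← hNN] at hc1
      rw [← hMN, ← hN1] at hc2
      rw [hc1, hc2, Fnat_closed m.toNat n.toNat (by omega) (by omega)]
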